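-- pv_equiv track=rewrite | github.com/nextstrain/augur | augur/export_v2.py | counter_to_disambiguation_suffix
-- ===== SOURCE A (Python) =====
-- from collections import defaultdict, deque, OrderedDict
--
-- def counter_to_disambiguation_suffix(count):
--     """Given a numeric count of author papers, return a distinct alphabetical
--     disambiguation suffix.
--
--     Examples
--     --------
--     >>> counter_to_disambiguation_suffix(0)
--     'A'
--     >>> counter_to_disambiguation_suffix(25)
--     'Z'
--     >>> counter_to_disambiguation_suffix(26)
--     'AA'
--     >>> counter_to_disambiguation_suffix(51)
--     'AZ'
--     >>> counter_to_disambiguation_suffix(52)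
--     'BA'
--     """
--     letters = "ABCDEFGHIJKLMNOPQRSTUVWXYZ"
--     base = len(letters)
--     suffix = deque()
--
--     # Find the appropriate combination of letters for the given count. This
--     # closely resembles the steps required to calculate the base 26 value of the
--     # given base 10 number.
--     while True:
--         quotient = count // base
--         remainder = count % base
--
--         # Collect remainders from right to left. Letters are zero-indexed such
--         # that a count of 0 returns an "A".
--         suffix.appendleft(letters[remainder])
--
--         # Stop when we've accounted for all possible quotient and remainder
--         # values.
--         if quotient == 0:
--             break
--
--         # Convert counts to zero-indexed values such that the next place value
--         # starts with the letter "A" instead of the letter "B".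
--         count = quotient - 1
--
--     return "".join(suffix)
-- ===== SOURCE B (Python) =====
-- def counter_to_disambiguation_suffix(count):
--     """Recursive re-implementation: divmod place-value recurrence, no deque."""
--     letters = "ABCDEFGHIJKLMNOPQRSTUVWXYZ"
--     quotient, remainder = divmod(count, 26)
--     if quotient == 0:
--         return letters[remainder]
--     return counter_to_disambiguation_suffix(quotient - 1) + letters[remainder]
-- ===== Notes on version B (the rewrite author's own statement) =====
-- stated objective: simpler
-- what changed: Replaced the while-loop with a deque and appendleft by a direct recursion on the count: divmod once, recurse on quotient-1 and append the current letter, dropping the deque/join machinery.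
import Mathlib
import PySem

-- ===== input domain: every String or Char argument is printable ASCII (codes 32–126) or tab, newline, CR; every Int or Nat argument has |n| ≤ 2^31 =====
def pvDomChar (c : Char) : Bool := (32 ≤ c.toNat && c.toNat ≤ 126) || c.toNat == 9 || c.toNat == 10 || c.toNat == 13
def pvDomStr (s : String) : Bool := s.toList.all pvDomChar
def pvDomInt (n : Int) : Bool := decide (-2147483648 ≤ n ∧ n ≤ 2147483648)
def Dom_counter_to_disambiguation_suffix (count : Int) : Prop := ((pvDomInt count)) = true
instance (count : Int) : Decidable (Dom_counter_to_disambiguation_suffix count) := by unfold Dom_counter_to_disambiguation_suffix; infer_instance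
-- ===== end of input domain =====

-- B replaces A's while-loop + deque/appendleft by a direct recursion on the count (same divmod recurrence); objective: simpler.

-- ===== PORT A =====
-- letters = "ABCDEFGHIJKLMNOPQRSTUVWXYZ" as a character list
def pvLetters : List Char := "ABCDEFGHIJKLMNOPQRSTUVWXYZ".toList

-- A's `while True` loop. The fuel only makes the recursion total: for count ≥ 0
-- (Pre_) the loop always breaks before the fuel runs out (proved below); for
-- negative count the Python loops forever.
def pvALoop : Nat → Int → List Char → List Char
  | 0, _, suffix => suffix
  | fuel+1, count, suffix =>
    let quotient := PySem.Int.floordiv count 26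
    let remainder := PySem.Int.mod count 26
    -- letters[remainder]: remainder is always in [0,26), so pyGet? never fails
    let suffix := (PySem.List.pyGet? pvLetters remainder).getD ' ' :: suffix
    if quotient = 0 then suffix
    else pvALoop fuel (quotient - 1) suffix

def counter_to_disambiguation_suffix (count : Int) : String :=
  String.mk (pvALoop (count.toNat + 1) count [])

-- ===== PORT B =====
-- Source B's recursion; on Pre_ (count ≥ 0) the recursion runs over count.toNat.
def pvBRec (n : Nat) : List Char :=
  let q := n / 26
  let r := n % 26
  if q = 0 then [(PySem.List.pyGet? pvLetters (r : Int)).getD ' ']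
  else pvBRec (q - 1) ++ [(PySem.List.pyGet? pvLetters (r : Int)).getD ' ']
termination_by n
decreasing_by omega

def counter_to_disambiguation_suffix_alt (count : Int) : String :=
  String.mk (pvBRec count.toNat)

-- ===== PRECONDITION & SPEC =====
-- A's while-loop never terminates for negative count (count oscillates at -2), so Pre_ is count ≥ 0.
def Pre_counter_to_disambiguation_suffix (count : Int) : Prop := 0 ≤ count
instance (count : Int) : Decidable (Pre_counter_to_disambiguation_suffix count) := by unfold Pre_counter_to_disambiguation_suffix; infer_instance
def pvWitness_counter_to_disambiguation_suffix : Int := 27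

def Spec_counter_to_disambiguation_suffix (count : Int) (out : String) : Prop := out = counter_to_disambiguation_suffix_alt count
instance (count : Int) (out : String) : Decidable (Spec_counter_to_disambiguation_suffix count out) := by unfold Spec_counter_to_disambiguation_suffix; infer_instance

-- ===== CLAIM (what is proved, stated in full; the proofs are below) =====
def Claim_equal_counter_to_disambiguation_suffix : Prop := ∀ (count : Int), Dom_counter_to_disambiguation_suffix count → Pre_counter_to_disambiguation_suffix count → Spec_counter_to_disambiguation_suffix count (counter_to_disambiguation_suffix count)

-- ===== LEMMAS AND PROOFS =====
theorem pvALoop_eq_pvBRec (n : Nat) : ∀ (fuel : Nat) (acc : List Char), n < fuel →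
    pvALoop fuel (n : Int) acc = pvBRec n ++ acc := by
  induction n using Nat.strong_induction_on with
  | _ n ih =>
    intro fuel acc hf
    match fuel, hf with
    | f+1, _ =>
      have hfd : PySem.Int.floordiv (n : Int) 26 = ((n / 26 : Nat) : Int) := by
        rw [PySem.Int.floordiv_eq_ediv_of_pos (by norm_num)]; omega
      have hmd : PySem.Int.mod (n : Int) 26 = ((n % 26 : Nat) : Int) := by
        rw [PySem.Int.mod_eq_emod_of_pos (by norm_num)]; omega
      rw [pvALoop]
      simp only [hfd, hmd]
      by_cases hq : n / 26 = 0
      · simp [pvBRec, hq]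
      · have h1 : ((n / 26 : Nat) : Int) ≠ 0 := by exact_mod_cast hq
        have h2 : ((n / 26 : Nat) : Int) - 1 = ((n / 26 - 1 : Nat) : Int) := by omega
        rw [if_neg h1, h2,
          ih (n / 26 - 1) (by omega) f _ (by omega)]
        conv_rhs => rw [pvBRec]
        simp [hq, List.append_assoc]

theorem counter_to_disambiguation_suffix_spec : Claim_equal_counter_to_disambiguation_suffix := by
  intro count _ hpre
  obtain ⟨n, rfl⟩ : ∃ n : Nat, count = (n : Int) := ⟨count.toNat, (Int.toNat_of_nonneg hpre).symm⟩
  unfold Spec_counter_to_disambiguation_suffix counter_to_disambiguation_suffix counter_to_disambiguation_suffix_alt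
  rw [Int.toNat_natCast, pvALoop_eq_pvBRec n (n + 1) [] (by omega)]
  simp
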